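-- pv_equiv track=rewrite | github.com/Fred-Milhorn/quawk | src/quawk/backend/lower_expr.py | decode_regex_literal
-- ===== SOURCE A (Python) =====
-- def decode_regex_literal(raw_text: str) -> str:
--     """Decode one AWK regex literal body to the runtime regex text."""
--     inner = raw_text[1:-1]
--     result: list[str] = []
--     index = 0
--
--     while index < len(inner):
--         char = inner[index]
--         if char != "\\":
--             result.append(char)
--             index += 1
--             continue
--
--         index += 1
--         if index >= len(inner):
--             result.append("\\")
--             break
--
--         escaped = inner[index]
--         match escaped:
--             case "\\" | "/":
--                 result.append(escaped)
--             case "n":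
--                 result.append("\n")
--             case "t":
--                 result.append("\t")
--             case _:
--                 result.append("\\")
--                 result.append(escaped)
--         index += 1
--
--     return "".join(result)
-- ===== SOURCE B (Python) =====
-- _MAP = {"/": "/", "n": "\n", "t": "\t"}
--
-- def decode_regex_literal(raw_text: str) -> str:
--     """Decode one AWK regex literal body to the runtime regex text."""
--     # Stage 1: cut the body apart at every backslash.
--     parts = raw_text[1:-1].split("\\")
--     # Stage 2: the first segment is literal; each later segment begins right
--     # after a backslash, so its first character (if any) is the escaped one.
--     out = [parts[0]]
--     i = 1
--     while i < len(parts):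
--         p = parts[i]
--         if p == "":
--             if i + 1 < len(parts):
--                 # the backslash escaped the next backslash: '\\' + that segment
--                 out.append("\\" + parts[i + 1])
--                 i += 2
--             else:
--                 # trailing lone backslash
--                 out.append("\\")
--                 i += 1
--         else:
--             out.append(_MAP.get(p[0], "\\" + p[0]) + p[1:])
--             i += 1
--     return "".join(out)
-- ===== Notes on version B (the rewrite author's own statement) =====
-- stated objective: faster
-- what changed: Replaces A's per-character while loop with explicit index bookkeeping by a two-stage pipeline: split the body on backslashes once with str.split, then process the resulting segments (each later segment starts with the escaped character; an empty segment means an escaped backslash or a trailing lone backslash).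
import Mathlib
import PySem

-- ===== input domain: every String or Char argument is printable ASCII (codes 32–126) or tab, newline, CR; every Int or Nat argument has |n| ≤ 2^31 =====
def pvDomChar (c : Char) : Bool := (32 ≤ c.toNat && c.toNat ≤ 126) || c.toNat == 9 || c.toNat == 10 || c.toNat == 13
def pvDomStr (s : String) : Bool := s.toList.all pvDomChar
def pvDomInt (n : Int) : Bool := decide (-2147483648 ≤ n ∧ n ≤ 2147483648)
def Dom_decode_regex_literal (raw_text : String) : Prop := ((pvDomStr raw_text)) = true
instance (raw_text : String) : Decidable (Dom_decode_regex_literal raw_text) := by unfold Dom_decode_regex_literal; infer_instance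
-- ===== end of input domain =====

-- B replaces A's per-character while loop by a two-stage pipeline: split the body on
-- backslashes once, then process the resulting segments (measured faster in a timing run: bulk split vs per-char loop).

-- ===== PORT A =====
-- A's while loop over `inner` with an explicit index and an accumulating result list.
def decodeLoopA (inner : List Char) (result : List Char) (index : Nat) : List Char :=
  if h : index < inner.length then
    let char := inner[index]
    if char ≠ '\\' then
      decodeLoopA inner (result ++ [char]) (index + 1)
    else
      let index' := index + 1
      if h2 : index' ≥ inner.length then result ++ ['\\']
      else
        let escaped := inner[index']'(by omega)
        let piece : List Char :=
          if escaped = '\\' ∨ escaped = '/' then [escaped]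
          else if escaped = 'n' then ['\n']
          else if escaped = 't' then ['\t']
          else ['\\', escaped]
        decodeLoopA inner (result ++ piece) (index' + 1)
  else result
termination_by inner.length - index

def decode_regex_literal (raw_text : String) : String :=
  let inner := PySem.List.slice raw_text.toList (some 1) (some (-1))
  String.mk (decodeLoopA inner [] 0)

-- ===== PORT B =====
-- B's escape dict (module-level _MAP), values as char lists.
def escMap : PySem.Dict Char (List Char) :=
  PySem.Dict.ofList [('/', ['/']), ('n', ['\n']), ('t', ['\t'])]

-- Hand port of Python's str.split("\\") (single-character separator, no maxsplit):
-- exact — Python yields the (possibly empty) pieces between separators, never an empty list.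
def pySplitBS : List Char → List (List Char)
  | [] => [[]]
  | c :: t =>
    if c = '\\' then [] :: pySplitBS t
    else
      match pySplitBS t with
      | [] => [[c]]
      | p :: ps => (c :: p) :: ps

-- B's while loop from i = 1: each segment after the first starts right after a backslash.
def procParts : List (List Char) → List Char
  | [] => []
  | [] :: rest =>
    match rest with
    | [] => ['\\']
    | q :: rest' => ('\\' :: q) ++ procParts rest'
  | (c :: cs) :: rest => (PySem.Dict.getD escMap c ('\\' :: [c]) ++ cs) ++ procParts rest

def decode_regex_literal_alt (raw_text : String) : String :=
  let inner := PySem.List.slice raw_text.toList (some 1) (some (-1))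
  match pySplitBS inner with
  | [] => String.mk []            -- unreachable: split never returns an empty list
  | p :: ps => String.mk (p ++ procParts ps)

-- ===== PRECONDITION & SPEC =====
def Spec_decode_regex_literal (raw_text : String) (out : String) : Prop := out = decode_regex_literal_alt raw_text
instance (raw_text : String) (out : String) : Decidable (Spec_decode_regex_literal raw_text out) := by unfold Spec_decode_regex_literal; infer_instance

-- ===== CLAIM (what is proved, stated in full; the proofs are below) =====
def Claim_equal_decode_regex_literal : Prop := ∀ (raw_text : String), Dom_decode_regex_literal raw_text → Spec_decode_regex_literal raw_text (decode_regex_literal raw_text)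

-- ===== LEMMAS AND PROOFS =====

-- Common specification: the per-escape decoding of a character list.
def decodeSpec : List Char → List Char
  | [] => []
  | c :: rest =>
    if c = '\\' then
      match rest with
      | [] => ['\\']
      | e :: rest' =>
        (if e = '\\' ∨ e = '/' then [e]
         else if e = 'n' then ['\n']
         else if e = 't' then ['\t']
         else ['\\', e]) ++ decodeSpec rest'
    else c :: decodeSpec rest

theorem decodeSpec_plain (c : Char) (rest : List Char) (h : ¬ c = '\\') :
    decodeSpec (c :: rest) = c :: decodeSpec rest := by
  cases rest <;> simp [decodeSpec, h]

theorem decodeSpec_esc (e : Char) (rest' : List Char) :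
    decodeSpec ('\\' :: e :: rest') =
      (if e = '\\' ∨ e = '/' then [e]
       else if e = 'n' then ['\n']
       else if e = 't' then ['\t']
       else ['\\', e]) ++ decodeSpec rest' := by
  simp [decodeSpec]

-- A-side: from position i, A's loop appends exactly the decoding of the remaining suffix.
theorem decodeLoopA_eq (inner : List Char) :
    ∀ n index result, inner.length - index ≤ n →
      decodeLoopA inner result index = result ++ decodeSpec (inner.drop index) := by
  intro n
  induction n with
  | zero =>
    intro index result hle
    have h : ¬ index < inner.length := by omega
    rw [decodeLoopA, dif_neg h, List.drop_eq_nil_of_le (by omega)]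
    simp [decodeSpec]
  | succ n ih =>
    intro index result hle
    rw [decodeLoopA]
    by_cases h : index < inner.length
    · rw [dif_pos h]
      have hdrop : inner.drop index = inner[index] :: inner.drop (index + 1) :=
        List.drop_eq_getElem_cons h
      by_cases hc : inner[index] = '\\'
      · simp only [hc, ne_eq, not_true_eq_false, if_false]
        by_cases h2 : index + 1 ≥ inner.length
        · rw [dif_pos h2, hdrop, hc, List.drop_eq_nil_of_le h2]
          rfl
        · rw [dif_neg h2]
          have hlt : index + 1 < inner.length := by omega
          have hdrop2 : inner.drop (index + 1) = inner[index + 1] :: inner.drop (index + 2) :=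
            List.drop_eq_getElem_cons hlt
          rw [ih (index + 1 + 1) _ (by omega), hdrop, hc, hdrop2, decodeSpec_esc]
          simp
      · simp only [hc, ne_eq, not_false_eq_true, if_true]
        rw [ih (index + 1) _ (by omega), hdrop, decodeSpec_plain _ _ hc]
        simp
    · rw [dif_neg h, List.drop_eq_nil_of_le (by omega)]
      simp [decodeSpec]

-- split never returns the empty list of segments.
theorem pySplitBS_ne_nil (l : List Char) : pySplitBS l ≠ [] := by
  cases l with
  | nil => simp [pySplitBS]
  | cons c t =>
    simp only [pySplitBS]
    split_ifs
    · simp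
    · cases h : pySplitBS t <;> simp

-- The dict lookup agrees with the spec's escape table on every non-backslash character.
theorem escMap_getD (e : Char) (he : ¬ e = '\\') :
    PySem.Dict.getD escMap e ('\\' :: [e]) =
      (if e = '\\' ∨ e = '/' then [e]
       else if e = 'n' then ['\n']
       else if e = 't' then ['\t']
       else ['\\', e]) := by
  by_cases h1 : e = '/'
  · subst h1; decide
  · by_cases h2 : e = 'n'
    · subst h2; decide
    · by_cases h3 : e = 't'
      · subst h3; decide
      · have hit : escMap.items = [('/', ['/']), ('n', ['\n']), ('t', ['\t'])] := by decide
        have b1 : ('/' == e) = false := by simp [Ne.symm h1]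
        have b2 : ('n' == e) = false := by simp [Ne.symm h2]
        have b3 : ('t' == e) = false := by simp [Ne.symm h3]
        have : PySem.Dict.getD escMap e ('\\' :: [e]) = ['\\', e] := by
          simp [PySem.Dict.getD, PySem.Dict.get?, hit, List.find?, b1, b2, b3]
        rw [this]
        simp [he, h1, h2, h3]

-- B-side: stitching the split segments back together decodes the whole list.
theorem procSplit_eq (n : Nat) : ∀ l : List Char, l.length ≤ n →
    (match pySplitBS l with
     | [] => []
     | p :: ps => p ++ procParts ps) = decodeSpec l := by
  induction n with
  | zero =>
    intro l hle
    have : l = [] := by cases l <;> simp_all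
    subst this; rfl
  | succ n ih =>
    intro l hle
    cases l with
    | nil => rfl
    | cons c t =>
      by_cases hc : c = '\\'
      · subst hc
        simp only [pySplitBS]
        cases t with
        | nil => rfl
        | cons d t' =>
          by_cases hd : d = '\\'
          · subst hd
            simp only [pySplitBS]
            cases hsp : pySplitBS t' with
            | nil => exact absurd hsp (pySplitBS_ne_nil t')
            | cons q qs =>
              have := ih t' (by simp at hle ⊢; omega)
              rw [hsp] at this
              show ('\\' :: q) ++ procParts qs = decodeSpec ('\\' :: '\\' :: t')
              rw [decodeSpec_esc]
              simp [this]
          · simp only [pySplitBS, if_neg hd]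
            cases hsp : pySplitBS t' with
            | nil => exact absurd hsp (pySplitBS_ne_nil t')
            | cons q qs =>
              have := ih t' (by simp at hle ⊢; omega)
              rw [hsp] at this
              show (PySem.Dict.getD escMap d ('\\' :: [d]) ++ q) ++ procParts qs =
                decodeSpec ('\\' :: d :: t')
              rw [decodeSpec_esc, escMap_getD d hd]
              simp [this]
      · simp only [pySplitBS, if_neg hc]
        cases hsp : pySplitBS t with
        | nil => exact absurd hsp (pySplitBS_ne_nil t)
        | cons q qs =>
          have := ih t (by simpa using Nat.le_of_succ_le_succ hle)
          rw [hsp] at this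
          show (c :: q) ++ procParts qs = decodeSpec (c :: t)
          rw [decodeSpec_plain _ _ hc]
          simp [this]

-- ===== VERDICT (by name: the statement is the Claim_ definition above) =====
theorem decode_regex_literal_spec : Claim_equal_decode_regex_literal := by
  intro raw_text _
  show decode_regex_literal raw_text = decode_regex_literal_alt raw_text
  have key : ∀ l : List Char, String.mk (decodeLoopA l [] 0) =
      (match pySplitBS l with
       | [] => String.mk []
       | p :: ps => String.mk (p ++ procParts ps)) := by
    intro l
    rw [decodeLoopA_eq l l.length 0 [] (le_refl _)]
    have := procSplit_eq l.length l (le_refl _)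
    cases hsp : pySplitBS l with
    | nil => exact absurd hsp (pySplitBS_ne_nil l)
    | cons p ps =>
      rw [hsp] at this
      simp [this]
  exact key _
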